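-- pv_equiv track=rewrite | github.com/Crixis/study-and-practice | Practice/practice.py | reverse_words_order_and_swap_cases
-- ===== SOURCE A (Python) =====
-- def reverse_words_order_and_swap_cases(sentence):
--     mystr = ''
--     for i in sentence:
--         if i.isspace():
--             mystr+= " "
--         else:
--             if i.isupper():
--                 mystr+= i.lower()
--             if i.islower():
--                 mystr+= i.upper()
--     words = list(reversed(mystr.split()))
--     mywords = " ".join(words)
--     return mywords
-- ===== SOURCE B (Python) =====
-- def reverse_words_order_and_swap_cases(sentence):
--     parts = []
--     cur = []
--     for c in reversed(sentence):
--         if c.isspace():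
--             if cur:
--                 parts.append(''.join(reversed(cur)))
--                 cur = []
--         elif c.isupper():
--             cur.append(c.lower())
--         elif c.islower():
--             cur.append(c.upper())
--     if cur:
--         parts.append(''.join(reversed(cur)))
--     return ' '.join(parts)
-- ===== Notes on version B (the rewrite author's own statement) =====
-- stated objective: alternative
-- what changed: B replaces A's transform-then-split-then-reverse staging by a single right-to-left character scan with an explicit (parts, current-word) state machine that emits the reversed word list directly, with no split and no word-list reversal.
import Mathlib
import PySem

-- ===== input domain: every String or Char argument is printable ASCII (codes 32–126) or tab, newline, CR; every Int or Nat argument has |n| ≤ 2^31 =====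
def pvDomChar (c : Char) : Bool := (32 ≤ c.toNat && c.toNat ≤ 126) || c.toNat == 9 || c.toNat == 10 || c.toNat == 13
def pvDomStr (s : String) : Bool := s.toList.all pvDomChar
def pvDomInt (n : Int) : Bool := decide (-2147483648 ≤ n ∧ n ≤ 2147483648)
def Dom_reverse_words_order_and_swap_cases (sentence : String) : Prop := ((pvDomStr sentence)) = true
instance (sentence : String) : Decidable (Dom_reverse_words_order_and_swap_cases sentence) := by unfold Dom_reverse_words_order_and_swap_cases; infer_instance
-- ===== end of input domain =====

-- B's change: a single right-to-left scan with a (parts, current-word) state machine builds the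
-- reversed word list directly — no transformed intermediate string, no split, no word-list reversal.

-- ===== PORT A =====
def reverse_words_order_and_swap_cases (sentence : String) : String :=
  let mystr := sentence.toList.foldl (fun acc c =>
    if PySem.Chars.isspace c then acc ++ [' ']
    else acc ++ (if PySem.Chars.isupper c then [PySem.Chars.lowerChar c] else [])
             ++ (if PySem.Chars.islower c then [PySem.Chars.upperChar c] else [])) []
  let words := (PySem.Chars.split₀ mystr).reverse
  String.mk (PySem.Chars.join [' '] words)

-- ===== PORT B =====
-- one step of B's loop body: state = (parts, cur), consuming one char of reversed(sentence)
def pvStepB (st : List (List Char) × List Char) (c : Char) : List (List Char) × List Char :=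
  if PySem.Chars.isspace c then
    if st.2.isEmpty then st else (st.1 ++ [st.2.reverse], [])
  else if PySem.Chars.isupper c then (st.1, st.2 ++ [PySem.Chars.lowerChar c])
  else if PySem.Chars.islower c then (st.1, st.2 ++ [PySem.Chars.upperChar c])
  else st

def reverse_words_order_and_swap_cases_alt (sentence : String) : String :=
  let st := sentence.toList.reverse.foldl pvStepB ([], [])
  let parts := if st.2.isEmpty then st.1 else st.1 ++ [st.2.reverse]
  String.mk (PySem.Chars.join [' '] parts)

-- ===== PRECONDITION & SPEC =====
def Spec_reverse_words_order_and_swap_cases (sentence : String) (out : String) : Prop := out = reverse_words_order_and_swap_cases_alt sentence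
instance (sentence : String) (out : String) : Decidable (Spec_reverse_words_order_and_swap_cases sentence out) := by unfold Spec_reverse_words_order_and_swap_cases; infer_instance

-- ===== CLAIM (what is proved, stated in full; the proofs are below) =====
def Claim_equal_reverse_words_order_and_swap_cases : Prop := ∀ (sentence : String), Dom_reverse_words_order_and_swap_cases sentence → Spec_reverse_words_order_and_swap_cases sentence (reverse_words_order_and_swap_cases sentence)

-- ===== LEMMAS AND PROOFS =====

-- per-character contribution of A's loop body
def pvM (c : Char) : List Char :=
  if PySem.Chars.isspace c then [' ']
  else (if PySem.Chars.isupper c then [PySem.Chars.lowerChar c] else [])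
    ++ (if PySem.Chars.islower c then [PySem.Chars.upperChar c] else [])

-- B's backward foldl, as a foldr over the original list
def pvS (l : List Char) : List (List Char) × List Char :=
  l.foldr (fun c st => pvStepB st c) ([], [])

lemma pvA_foldl_eq_flatMap (cs : List Char) :
    cs.foldl (fun acc c =>
      if PySem.Chars.isspace c then acc ++ [' ']
      else acc ++ (if PySem.Chars.isupper c then [PySem.Chars.lowerChar c] else [])
               ++ (if PySem.Chars.islower c then [PySem.Chars.upperChar c] else [])) []
      = cs.flatMap pvM := by
  have h := PySem.List.foldl_append_eq_flatMap (l := cs) (g := pvM) (acc := [])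
  rw [List.nil_append] at h
  rw [← h]
  apply PySem.List.foldl_congr_mem
  intro acc c _
  simp only [pvM]
  split_ifs <;> simp

lemma pv_char_le_iff (a c : Char) : (a ≤ c) ↔ a.toNat ≤ c.toNat :=
  ⟨fun h => UInt32.le_iff_toNat_le.mp (Char.le_def.mp h),
   fun h => Char.le_def.mpr (UInt32.le_iff_toNat_le.mpr h)⟩

lemma pv_isupper_iff (c : Char) :
    PySem.Chars.isupper c = true ↔ 65 ≤ c.toNat ∧ c.toNat ≤ 90 := by
  simp only [PySem.Chars.isupper, Bool.and_eq_true, decide_eq_true_eq, pv_char_le_iff]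
  exact ⟨fun ⟨h1, h2⟩ => ⟨h1, h2⟩, fun ⟨h1, h2⟩ => ⟨h1, h2⟩⟩

lemma pv_islower_iff (c : Char) :
    PySem.Chars.islower c = true ↔ 97 ≤ c.toNat ∧ c.toNat ≤ 122 := by
  simp only [PySem.Chars.islower, Bool.and_eq_true, decide_eq_true_eq, pv_char_le_iff]
  exact ⟨fun ⟨h1, h2⟩ => ⟨h1, h2⟩, fun ⟨h1, h2⟩ => ⟨h1, h2⟩⟩

lemma pv_isspace_false {c : Char} (h1 : 33 ≤ c.toNat) (h2 : c.toNat ≤ 126) :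
    PySem.Chars.isspace c = false := by
  simp only [PySem.Chars.isspace, Bool.or_eq_false_iff, Bool.and_eq_false_iff,
    decide_eq_false_iff_not]
  omega

lemma pv_toNat_lowerChar {c : Char} (hu : PySem.Chars.isupper c = true) :
    (PySem.Chars.lowerChar c).toNat = c.toNat + 32 := by
  have hb := (pv_isupper_iff c).mp hu
  have hv : Nat.isValidChar (c.toNat + 32) := Or.inl (by omega)
  rw [PySem.Chars.lowerChar, if_pos hu]
  unfold Char.ofNat
  rw [dif_pos hv, Char.toNat_ofNatAux]

lemma pv_toNat_upperChar {c : Char} (hl : PySem.Chars.islower c = true) :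
    (PySem.Chars.upperChar c).toNat = c.toNat - 32 := by
  have hb := (pv_islower_iff c).mp hl
  have hv : Nat.isValidChar (c.toNat - 32) := Or.inl (by omega)
  rw [PySem.Chars.upperChar, if_pos hl]
  unfold Char.ofNat
  rw [dif_pos hv, Char.toNat_ofNatAux]

lemma pv_lower_not_space {c : Char} (hu : PySem.Chars.isupper c = true) :
    PySem.Chars.isspace (PySem.Chars.lowerChar c) = false := by
  have hb := (pv_isupper_iff c).mp hu
  exact pv_isspace_false (by rw [pv_toNat_lowerChar hu]; omega)
    (by rw [pv_toNat_lowerChar hu]; omega)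

lemma pv_upper_not_space {c : Char} (hl : PySem.Chars.islower c = true) :
    PySem.Chars.isspace (PySem.Chars.upperChar c) = false := by
  have hb := (pv_islower_iff c).mp hl
  exact pv_isspace_false (by rw [pv_toNat_upperChar hl]; omega)
    (by rw [pv_toNat_upperChar hl]; omega)

lemma pv_upper_not_lower {c : Char} (hu : PySem.Chars.isupper c = true) :
    PySem.Chars.islower c = false := by
  have := (pv_isupper_iff c).mp hu
  cases hb : PySem.Chars.islower c
  · rfl
  · have := (pv_islower_iff c).mp hb; omega

lemma pvM_space {c : Char} (hs : PySem.Chars.isspace c = true) : pvM c = [' '] := by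
  simp [pvM, hs]

lemma pvM_upper {c : Char} (hs : PySem.Chars.isspace c = false)
    (hu : PySem.Chars.isupper c = true) : pvM c = [PySem.Chars.lowerChar c] := by
  simp [pvM, hs, hu, pv_upper_not_lower hu]

lemma pvM_lower {c : Char} (hs : PySem.Chars.isspace c = false)
    (hu : PySem.Chars.isupper c = false) (hl : PySem.Chars.islower c = true) :
    pvM c = [PySem.Chars.upperChar c] := by
  simp [pvM, hs, hu, hl]

lemma pvM_other {c : Char} (hs : PySem.Chars.isspace c = false)
    (hu : PySem.Chars.isupper c = false) (hl : PySem.Chars.islower c = false) :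
    pvM c = [] := by
  simp [pvM, hs, hu, hl]

lemma pv_go_acc (cs : List Char) : ∀ cur acc,
    PySem.Chars.split₀.go cs cur acc = acc.reverse ++ PySem.Chars.split₀.go cs cur [] := by
  induction cs with
  | nil =>
    intro cur acc
    simp only [PySem.Chars.split₀.go]
    by_cases h : cur.isEmpty <;> simp [h]
  | cons c rest ih =>
    intro cur acc
    simp only [PySem.Chars.split₀.go]
    by_cases hs : PySem.Chars.isspace c
    · by_cases h : cur.isEmpty
      · simp only [hs, h, if_true]
        exact ih [] acc
      · simp only [hs, h, if_true]
        rw [ih [] (cur.reverse :: acc), ih [] [cur.reverse]]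
        simp
    · simp only [hs]
      exact ih (c :: cur) acc

-- central invariant: splitting A's transformed stream of a suffix, with a word-prefix cur0
-- pending, equals B's backward-scan state over that suffix.
lemma pv_inv (rest : List Char) : ∀ cur0 : List Char,
    PySem.Chars.split₀.go (rest.flatMap pvM) cur0 []
      = (if (cur0.reverse ++ (pvS rest).2.reverse).isEmpty then []
         else [cur0.reverse ++ (pvS rest).2.reverse]) ++ (pvS rest).1.reverse := by
  induction rest with
  | nil =>
    intro cur0
    simp only [pvS, List.foldr_nil, List.flatMap_nil, PySem.Chars.split₀.go]
    by_cases h : cur0.isEmpty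
    · have : cur0 = [] := by simpa [List.isEmpty_iff] using h
      subst this; simp
    · have : cur0 ≠ [] := by simpa [List.isEmpty_iff] using h
      simp [h, this]
  | cons c r ih =>
    intro cur0
    have hstep : pvS (c :: r) = pvStepB (pvS r) c := by
      simp [pvS, List.foldr_cons]
    by_cases hs : PySem.Chars.isspace c
    · -- space: the stream gets a ' ', B flushes cur
      have hm := pvM_space hs
      have hsp : PySem.Chars.isspace ' ' = true := by decide
      simp only [List.flatMap_cons, hm, List.singleton_append, PySem.Chars.split₀.go, hsp,
        if_true]
      rw [hstep]
      by_cases hc0 : cur0.isEmpty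
      · have hc0' : cur0 = [] := by simpa [List.isEmpty_iff] using hc0
        subst hc0'
        rw [if_pos hc0]
        have h0 := ih []
        simp only [List.reverse_nil, List.nil_append] at h0 ⊢
        rw [h0]
        by_cases hc : (pvS r).2.isEmpty
        · have he : (pvS r).2 = [] := by simpa [List.isEmpty_iff] using hc
          simp [pvStepB, hs, hc, he]
        · have hne : (pvS r).2.reverse ≠ [] := by
            simp only [List.isEmpty_iff] at hc
            simp [hc]
          simp [pvStepB, hs, hc, hne]
      · have hne0 : cur0.reverse ≠ [] := by
          simp only [List.isEmpty_iff] at hc0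
          simp [hc0]
        have hc0' : cur0 ≠ [] := by simpa [List.isEmpty_iff] using hc0
        rw [if_neg hc0]
        rw [pv_go_acc (r.flatMap pvM) [] [cur0.reverse]]
        have h0 := ih []
        simp only [List.reverse_nil, List.nil_append] at h0
        rw [h0]
        by_cases hc : (pvS r).2.isEmpty
        · have he : (pvS r).2 = [] := by simpa [List.isEmpty_iff] using hc
          simp [pvStepB, hs, hc, he, hne0, hc0']
        · have hne : (pvS r).2.reverse ≠ [] := by
            simp only [List.isEmpty_iff] at hc
            simp [hc]
          simp [pvStepB, hs, hc, hne0, hne, hc0']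
    · by_cases hu : PySem.Chars.isupper c
      · -- uppercase: the stream gets lowerChar c, B appends it to cur
        have hm := pvM_upper (by simpa using hs) hu
        have hns := pv_lower_not_space hu
        simp only [List.flatMap_cons, hm, List.singleton_append, PySem.Chars.split₀.go, hns,
          if_neg Bool.false_ne_true]
        rw [ih (PySem.Chars.lowerChar c :: cur0), hstep]
        simp [pvStepB, hs, hu]
      · by_cases hl : PySem.Chars.islower c
        · -- lowercase: the stream gets upperChar c, B appends it to cur
          have hm := pvM_lower (by simpa using hs) (by simpa using hu) hl
          have hns := pv_upper_not_space hl
          simp only [List.flatMap_cons, hm, List.singleton_append, PySem.Chars.split₀.go, hns,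
            if_neg Bool.false_ne_true]
          rw [ih (PySem.Chars.upperChar c :: cur0), hstep]
          simp [pvStepB, hs, hu, hl]
        · -- uncased non-space: contributes nothing to either side
          have hm := pvM_other (by simpa using hs) (by simpa using hu) (by simpa using hl)
          simp only [List.flatMap_cons, hm, List.nil_append]
          rw [ih cur0, hstep]
          simp [pvStepB, hs, hu, hl]

-- ===== VERDICT (by name: the statement is the Claim_ definition above) =====
theorem reverse_words_order_and_swap_cases_spec : Claim_equal_reverse_words_order_and_swap_cases := by
  intro sentence _
  show _ = _
  unfold reverse_words_order_and_swap_cases reverse_words_order_and_swap_cases_alt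
  simp only [pvA_foldl_eq_flatMap]
  rw [show sentence.toList.reverse.foldl pvStepB ([], [])
      = pvS sentence.toList by simp [pvS, List.foldl_reverse]]
  rw [PySem.Chars.split₀]
  have h := pv_inv sentence.toList []
  simp only [List.reverse_nil, List.nil_append] at h
  rw [h]
  by_cases hc : (pvS sentence.toList).2.isEmpty
  · have : (pvS sentence.toList).2 = [] := by simpa [List.isEmpty_iff] using hc
    simp [hc, this]
  · have hne : (pvS sentence.toList).2.reverse ≠ [] := by
      simp only [List.isEmpty_iff] at hc
      simp [hc]
    simp [hc, hne]
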